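-- pv_equiv track=rewrite | github.com/momom2/Wesnoth-AI | tools/terrain_resolver.py | merge_alias_lists
-- ===== SOURCE A (Python) =====
-- from typing import Dict, List, Mapping, Optional
--
-- MARKER_PLUS  = "+"
--
-- MARKER_MINUS = "-"
--
-- MARKER_BASE  = "_bas"
--
-- def merge_alias_lists(first: List[str], second: List[str]) -> List[str]:
--     """Mirror of `wesnoth_src/src/terrain/terrain.cpp:334-377`.
--
--     Walks `first` looking for the BASE marker, removes it, and splices
--     `second` in at that position. Adds a PLUS or MINUS marker after
--     the splice depending on the revert state -- this preserves the
--     "prefer-low until MINUS, prefer-high after" semantics of the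
--     composite alias list.
--
--     Used for composite terrain (e.g. `Gs^Vhs`): start with the
--     overlay's mvt_type, merge in the base's mvt_type at the
--     overlay's `_bas` placeholder.
--     """
--     result = list(first)
--     revert = bool(result) and result[0] == MARKER_MINUS
--     i = 0
--     while i < len(result):
--         tok = result[i]
--         if tok == MARKER_PLUS:
--             revert = False
--             i += 1
--             continue
--         if tok == MARKER_MINUS:
--             revert = True
--             i += 1
--             continue
--         if tok == MARKER_BASE:
--             # Erase BASE.
--             result.pop(i)
--             # Insert PLUS or MINUS at the now-vacant position to
--             # preserve the marker state for tokens AFTER the splice.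
--             marker = MARKER_MINUS if revert else MARKER_PLUS
--             result.insert(i, marker)
--             # Insert second's tokens BEFORE the marker we just placed.
--             for j, s_tok in enumerate(second):
--                 result.insert(i + j, s_tok)
--             break
--         i += 1
--     return result
-- ===== SOURCE B (Python) =====
-- from typing import List
--
-- MARKER_PLUS  = "+"
-- MARKER_MINUS = "-"
-- MARKER_BASE  = "_bas"
--
-- def merge_alias_lists(first: List[str], second: List[str]) -> List[str]:
--     """Phased version: locate BASE, compute the sign by a backward scan
--     over the prefix, then build the result with slicing."""
--     try:
--         i = first.index(MARKER_BASE)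
--     except ValueError:
--         return list(first)
--     marker = MARKER_PLUS
--     for tok in reversed(first[:i]):
--         if tok == MARKER_PLUS or tok == MARKER_MINUS:
--             marker = tok
--             break
--     return first[:i] + list(second) + [marker] + first[i+1:]
-- ===== Notes on version B (the rewrite author's own statement) =====
-- stated objective: faster
-- what changed: Replaces the single stateful scan (flag threaded through the locate loop, then in-place pop/insert splicing) by three independent phases: index() to find BASE, a backward scan of the prefix for the last sign marker, and one slice concatenation to build the result.
import Mathlib
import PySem

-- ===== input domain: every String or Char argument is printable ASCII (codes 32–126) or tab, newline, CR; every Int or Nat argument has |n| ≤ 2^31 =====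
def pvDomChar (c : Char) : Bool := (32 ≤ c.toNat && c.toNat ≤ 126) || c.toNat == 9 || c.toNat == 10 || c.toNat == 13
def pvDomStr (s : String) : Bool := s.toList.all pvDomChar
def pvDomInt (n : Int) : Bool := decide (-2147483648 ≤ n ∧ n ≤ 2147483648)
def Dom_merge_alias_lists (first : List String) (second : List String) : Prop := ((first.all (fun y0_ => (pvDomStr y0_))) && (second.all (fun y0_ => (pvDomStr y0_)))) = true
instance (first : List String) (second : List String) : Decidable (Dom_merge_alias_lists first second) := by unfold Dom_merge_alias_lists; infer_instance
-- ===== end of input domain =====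

-- B does the same splice in three independent phases (index(), backward marker scan, slice
-- concatenation) instead of A's single stateful pass with in-place pop/insert; return values
-- are proved equal on all inputs (neither implementation mutates its arguments' observable
-- values from the caller's point of view in this port, which is about return values).

-- ===== PORT A =====
-- the while loop of A: result is only read until the BASE branch fires
def mergeLoopA (second : List String) (result : List String) (revert : Bool) (i : Nat) : List String :=
  if h : i < result.length then
    let tok := result[i]
    if tok = "+" then mergeLoopA second result false (i + 1)
    else if tok = "-" then mergeLoopA second result true (i + 1)
    else if tok = "_bas" then
      match PySem.List.pop? result (i : Int) with    -- result.pop(i)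
      | none => result                                -- unreachable: i < len(result)
      | some (_, r1) =>
        let marker := if revert then "-" else "+"
        let r2 := PySem.List.insert r1 (i : Int) marker    -- result.insert(i, marker)
        -- for j, s_tok in enumerate(second): result.insert(i + j, s_tok)
        (PySem.List.enumerate second 0).foldl
          (fun r p => PySem.List.insert r ((i : Int) + p.1) p.2) r2
    else mergeLoopA second result revert (i + 1)
  else result
termination_by result.length - i

def merge_alias_lists (first : List String) (second : List String) : List String :=
  let result := first
  let revert := decide (result ≠ []) && (result.headD "" == "-")   -- bool(result) and result[0] == MARKER_MINUS
  mergeLoopA second result revert 0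

-- ===== PORT B =====
-- for tok in reversed(first[:i]): if tok in ("+","-"): marker = tok; break   (default "+")
def findMarkerB : List String → String
  | [] => "+"
  | t :: rest => if t == "+" || t == "-" then t else findMarkerB rest

def merge_alias_lists_alt (first : List String) (second : List String) : List String :=
  match PySem.List.index? first "_bas" with
  | none => first                                     -- except ValueError: return list(first)
  | some i =>
    let pre := PySem.List.slice first none (some (i : Int))     -- first[:i]
    let marker := findMarkerB pre.reverse
    pre ++ second ++ [marker] ++ PySem.List.slice first (some ((i : Int) + 1)) none  -- first[i+1:]

-- ===== PRECONDITION & SPEC =====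
def Spec_merge_alias_lists (first : List String) (second : List String) (out : List String) : Prop := out = merge_alias_lists_alt first second
instance (first : List String) (second : List String) (out : List String) : Decidable (Spec_merge_alias_lists first second out) := by unfold Spec_merge_alias_lists; infer_instance

-- ===== CLAIM (what is proved, stated in full; the proofs are below) =====
def Claim_equal_merge_alias_lists : Prop := ∀ (first : List String) (second : List String), Dom_merge_alias_lists first second → Spec_merge_alias_lists first second (merge_alias_lists first second)

-- ===== LEMMAS AND PROOFS =====

-- A's revert flag after scanning a marker-free-of-BASE segment
def revAfter (b : Bool) : List String → Bool
  | [] => b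
  | t :: r => revAfter (if t = "+" then false else if t = "-" then true else b) r

-- last "+"/"-" marker of a list, if any
def lastMk : List String → Option String
  | [] => none
  | t :: r =>
    match lastMk r with
    | some m => some m
    | none => if t = "+" ∨ t = "-" then some t else none

-- first "+"/"-" marker of a list, if any
def firstMk : List String → Option String
  | [] => none
  | t :: r => if t = "+" ∨ t = "-" then some t else firstMk r

lemma revAfter_eq (l : List String) : ∀ b, revAfter b l = (match lastMk l with | none => b | some m => decide (m = "-")) := by
  induction l with
  | nil => intro b; rfl
  | cons t r ih =>
    intro b
    simp only [revAfter, lastMk, ih]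
    cases hr : lastMk r with
    | some m => simp
    | none => by_cases h1 : t = "+" <;> by_cases h2 : t = "-" <;> simp_all
lemma firstMk_append (xs ys : List String) : firstMk (xs ++ ys) = (firstMk xs).or (firstMk ys) := by
  induction xs with
  | nil => rfl
  | cons t r ih => by_cases h : t = "+" ∨ t = "-" <;> simp [firstMk, h, ih]

lemma lastMk_eq_firstMk_reverse (l : List String) : lastMk l = firstMk l.reverse := by
  induction l with
  | nil => rfl
  | cons t r ih =>
    simp only [lastMk, List.reverse_cons, firstMk_append, ih]
    cases firstMk r.reverse <;> simp [firstMk, Option.or]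

lemma findMarkerB_eq (l : List String) : findMarkerB l = (firstMk l).getD "+" := by
  induction l with
  | nil => rfl
  | cons t r ih => by_cases h : t = "+" <;> by_cases h2 : t = "-" <;> simp_all [findMarkerB, firstMk]

lemma lastMk_is_marker : ∀ (l : List String) (m : String), lastMk l = some m → m = "+" ∨ m = "-" := by
  intro l
  induction l with
  | nil => intro m h; simp [lastMk] at h
  | cons t r ih =>
    intro m h
    simp only [lastMk] at h
    cases hr : lastMk r with
    | some m' =>
      rw [hr] at h
      exact (Option.some.inj h) ▸ ih m' hr
    | none =>
      rw [hr] at h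
      by_cases hm : t = "+" ∨ t = "-"
      · simp only [hm, if_pos] at h
        exact (Option.some.inj h) ▸ hm
      · simp [hm] at h

lemma lastMk_minus_cons (r : List String) : lastMk ("-" :: r) ≠ none := by
  simp only [lastMk]
  cases lastMk r <;> simp

-- the enumerate/insert fold splices s in front of post
lemma insFold (s : List String) : ∀ (pre post : List String) (i st : Nat), i + st = pre.length →
    (PySem.List.enumerate s (st : Int)).foldl
      (fun r p => PySem.List.insert r ((i : Int) + p.1) p.2) (pre ++ post) = pre ++ s ++ post := by
  induction s with
  | nil => intro pre post i st h; simp [PySem.List.enumerate_nil]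
  | cons x xs ih =>
    intro pre post i st h
    rw [PySem.List.enumerate_cons, List.foldl_cons]
    have hcast : (i : Int) + (st : Int) = ((i + st : Nat) : Int) := by push_cast; ring
    have hins : PySem.List.insert (pre ++ post) ((i : Int) + (st : Int)) x = (pre ++ [x]) ++ post := by
      rw [hcast, h, PySem.List.insert_natCast (pre ++ post) pre.length x (by simp)]
      simp
    have h2 : i + (st + 1) = (pre ++ [x]).length := by simp; omega
    have := ih (pre ++ [x]) post i (st + 1) h2
    rw [show ((st : Int) + 1) = ((st + 1 : Nat) : Int) by push_cast; ring] at *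
    simpa [hins] using this

-- main invariant of A's while loop
lemma mergeLoopA_eq (second : List String) : ∀ (n : Nat) (result : List String) (i : Nat) (revert : Bool),
    result.length - i ≤ n →
    mergeLoopA second result revert i =
      (match PySem.List.index? (result.drop i) "_bas" with
       | none => result
       | some k =>
          result.take (i + k) ++ second ++
            [if revAfter revert ((result.drop i).take k) then "-" else "+"] ++
            result.drop (i + k + 1)) := by
  intro n
  induction n with
  | zero =>
    intro result i revert h
    have hge : ¬ i < result.length := by omega
    rw [mergeLoopA]
    simp [hge, List.drop_eq_nil_of_le (by omega : result.length ≤ i), PySem.List.index?_eq_idxOf?]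
  | succ n ih =>
    intro result i revert h
    by_cases hlt : i < result.length
    · have hdrop : result.drop i = result[i] :: result.drop (i + 1) := (List.getElem_cons_drop hlt).symm
      by_cases hp : result[i] = "+"
      · rw [mergeLoopA]
        simp only [hlt, dif_pos, hp, if_pos]
        rw [ih result (i + 1) false (by omega)]
        have hidx : PySem.List.index? (result.drop i) "_bas"
            = (PySem.List.index? (result.drop (i + 1)) "_bas").map (· + 1) := by
          rw [hdrop, hp, PySem.List.index?_cons_of_ne _ (show ("+" : String) ≠ "_bas" by decide)]
        cases hk : PySem.List.index? (result.drop (i + 1)) "_bas" with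
        | none => rw [hidx, hk]; rfl
        | some k =>
          rw [hidx, hk]
          simp only [Option.map_some]
          rw [show i + (k + 1) = i + 1 + k by omega, show i + 1 + k + 1 = i + 1 + (k + 1) by omega]
          rw [hdrop, hp, List.take_succ_cons]
          simp [revAfter]
      · by_cases hm : result[i] = "-"
        · rw [mergeLoopA]
          simp only [hlt, dif_pos]
          rw [if_neg hp, if_pos hm]
          rw [ih result (i + 1) true (by omega)]
          have hidx : PySem.List.index? (result.drop i) "_bas"
              = (PySem.List.index? (result.drop (i + 1)) "_bas").map (· + 1) := by
            rw [hdrop, hm, PySem.List.index?_cons_of_ne _ (show ("-" : String) ≠ "_bas" by decide)]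
          cases hk : PySem.List.index? (result.drop (i + 1)) "_bas" with
          | none => rw [hidx, hk]; rfl
          | some k =>
            rw [hidx, hk]
            simp only [Option.map_some]
            rw [show i + (k + 1) = i + 1 + k by omega, show i + 1 + k + 1 = i + 1 + (k + 1) by omega]
            rw [hdrop, hm, List.take_succ_cons]
            simp [revAfter]
        · by_cases hb : result[i] = "_bas"
          · rw [mergeLoopA]
            simp only [hlt, dif_pos]
            rw [if_neg hp, if_neg hm, if_pos hb]
            have hidx : PySem.List.index? (result.drop i) "_bas" = some 0 := by
              rw [hdrop, hb]; exact PySem.List.index?_cons_self _ _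
            rw [PySem.List.pop?_natCast result i hlt, hidx]
            dsimp only
            have herase : result.eraseIdx i = result.take i ++ result.drop (i + 1) :=
              List.eraseIdx_eq_take_drop_succ result i
            have hlen : i ≤ (result.eraseIdx i).length := by
              rw [List.length_eraseIdx_of_lt hlt]; omega
            have htk : (result.eraseIdx i).take i = result.take i := by
              rw [herase, List.take_append_of_le_length (by simp; omega)]
              simp [List.take_take]
            have hdr : (result.eraseIdx i).drop i = result.drop (i + 1) := by
              rw [herase, List.drop_append_of_le_length (by simp; omega)]
              simp
            rw [PySem.List.insert_natCast _ i _ hlen, htk, hdr]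
            have hfold := insFold second (result.take i)
              ((if revert then "-" else "+") :: result.drop (i + 1)) i 0
              (by simp [List.length_take]; omega)
            simp only [Nat.cast_zero] at hfold
            rw [hfold]
            simp [revAfter]
          · rw [mergeLoopA]
            simp only [hlt, dif_pos]
            rw [if_neg hp, if_neg hm, if_neg hb]
            rw [ih result (i + 1) revert (by omega)]
            have hidx : PySem.List.index? (result.drop i) "_bas"
                = (PySem.List.index? (result.drop (i + 1)) "_bas").map (· + 1) := by
              rw [hdrop, PySem.List.index?_cons_of_ne _ hb]
            cases hk : PySem.List.index? (result.drop (i + 1)) "_bas" with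
            | none => rw [hidx, hk]; rfl
            | some k =>
              rw [hidx, hk]
              simp only [Option.map_some]
              rw [show i + (k + 1) = i + 1 + k by omega, show i + 1 + k + 1 = i + 1 + (k + 1) by omega]
              rw [hdrop, List.take_succ_cons]
              simp [revAfter, hp, hm]
    · rw [mergeLoopA]
      simp [hlt, List.drop_eq_nil_of_le (by omega : result.length ≤ i), PySem.List.index?_eq_idxOf?]

-- the sign A's flag carries to BASE equals B's backward scan of the prefix
lemma marker_agree (first : List String) (k : Nat) (hk : PySem.List.index? first "_bas" = some k) :
    (if revAfter (decide (first ≠ []) && (first.headD "" == "-")) (first.take k) then "-" else "+")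
      = findMarkerB (first.take k).reverse := by
  rw [findMarkerB_eq, ← lastMk_eq_firstMk_reverse, revAfter_eq]
  cases hl : lastMk (first.take k) with
  | some m => rcases lastMk_is_marker _ _ hl with h | h <;> subst h <;> simp
  | none =>
    simp only [Option.getD_none]
    cases first with
    | nil => simp [PySem.List.index?_eq_idxOf?] at hk
    | cons t r =>
      by_cases ht : t = "-"
      · exfalso
        subst ht
        have hkpos : 0 < k := by
          rw [PySem.List.index?_cons_of_ne _ (show ("-" : String) ≠ "_bas" by decide)] at hk
          cases hq : PySem.List.index? r "_bas" with
          | none => rw [hq] at hk; simp at hk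
          | some a => rw [hq] at hk; simp at hk; omega
        obtain ⟨k', rfl⟩ : ∃ k', k = k' + 1 := ⟨k - 1, by omega⟩
        rw [List.take_succ_cons] at hl
        exact lastMk_minus_cons _ hl
      · simp [ht]

-- ===== VERDICT (by name: the statement is the Claim_ definition above) =====
theorem merge_alias_lists_spec : Claim_equal_merge_alias_lists := by
  intro first second _
  unfold Spec_merge_alias_lists merge_alias_lists merge_alias_lists_alt
  rw [mergeLoopA_eq second first.length first 0 _ (by omega)]
  rw [List.drop_zero]
  cases hk : PySem.List.index? first "_bas" with
  | none => rfl
  | some k =>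
    dsimp only
    rw [PySem.List.slice_to_natCast,
        show ((k : Int) + 1) = ((k + 1 : Nat) : Int) by push_cast; ring,
        PySem.List.slice_from_natCast]
    rw [Nat.zero_add k, marker_agree first k hk]
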